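-- pv_equiv track=rewrite | github.com/dariusz-nowak/GameKeySeller | backend/getInformation/ggDeals/ggDealsCheckGames.py | sortGamesInList
-- ===== SOURCE A (Python) =====
-- def sortGamesInList(gamesList):
--     sortedGamesList = {
--         'new' : [],
--         'different price' : [],
--         'deleted' : [],
--     }
--
--     for game in gamesList:
--         if game['status'] == 'new': sortedGamesList['new'].append(game)
--         elif game['status'] == 'different price': sortedGamesList['different price'].append(game)
--         elif game['status'] == 'deleted': sortedGamesList['deleted'].append(game)
--
--     return sortedGamesList
-- ===== SOURCE B (Python) =====
-- def sortGamesInList(gamesList):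
--     return {key: [game for game in gamesList if game['status'] == key]
--             for key in ('new', 'different price', 'deleted')}
-- ===== Notes on version B (the rewrite author's own statement) =====
-- stated objective: simpler
-- what changed: Replaces the stateful one-pass three-branch if/elif accumulation into a pre-built dict by a dict comprehension that builds each bucket as a filter of gamesList per key, eliminating the branch chain and the mutation.
import Mathlib
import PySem

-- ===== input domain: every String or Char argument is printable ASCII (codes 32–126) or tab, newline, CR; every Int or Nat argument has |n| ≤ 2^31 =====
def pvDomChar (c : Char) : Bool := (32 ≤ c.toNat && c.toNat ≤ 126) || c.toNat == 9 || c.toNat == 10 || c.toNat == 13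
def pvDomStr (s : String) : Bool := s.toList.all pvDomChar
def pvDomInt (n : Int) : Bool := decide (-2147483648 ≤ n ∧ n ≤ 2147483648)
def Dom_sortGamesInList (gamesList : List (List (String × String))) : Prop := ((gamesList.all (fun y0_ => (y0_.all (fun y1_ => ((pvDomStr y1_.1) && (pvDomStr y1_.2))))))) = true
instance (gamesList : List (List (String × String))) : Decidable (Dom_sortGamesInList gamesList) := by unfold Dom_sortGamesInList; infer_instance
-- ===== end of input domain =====

-- B replaces the stateful three-branch if/elif accumulation with one filter of gamesList per key (simpler); return-value equivalence only.

-- ===== PORT A =====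
-- A keeps a dict with the three fixed keys and appends into the matching bucket; ported as a
-- fold over gamesList carrying the three bucket lists (the dict's values, keys never change).
def sortGamesInList (gamesList : List (List (String × String))) : List (String × List (List (String × String))) :=
  let r := gamesList.foldl
    (fun (acc : List (List (String × String)) × List (List (String × String)) × List (List (String × String))) game =>
      match (PySem.Dict.mk game).get? "status" with
      | some s =>
        if s = "new" then (acc.1 ++ [game], acc.2.1, acc.2.2)
        else if s = "different price" then (acc.1, acc.2.1 ++ [game], acc.2.2)
        else if s = "deleted" then (acc.1, acc.2.1, acc.2.2 ++ [game])
        else acc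
      | none => acc)  -- unreachable under Pre_ (Python raises KeyError here)
    ([], [], [])
  [("new", r.1), ("different price", r.2.1), ("deleted", r.2.2)]

-- ===== PORT B =====
def sortGamesInList_alt (gamesList : List (List (String × String))) : List (String × List (List (String × String))) :=
  ["new", "different price", "deleted"].map
    (fun key => (key, gamesList.filter (fun game => (PySem.Dict.mk game).get? "status" == some key)))

-- ===== PRECONDITION & SPEC =====
-- Pre_ excludes exactly the inputs where some game lacks a 'status' key: there Python A (and B) raise KeyError.
def Pre_sortGamesInList (gamesList : List (List (String × String))) : Prop :=
  (gamesList.all (fun game => game.any (fun p => p.1 == "status"))) = true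
instance (gamesList : List (List (String × String))) : Decidable (Pre_sortGamesInList gamesList) := by unfold Pre_sortGamesInList; infer_instance
def pvWitness_sortGamesInList : (List (List (String × String))) := [[("status", "new")], [("status", "deleted")]]

def Spec_sortGamesInList (gamesList : List (List (String × String))) (out : List (String × List (List (String × String)))) : Prop := out = sortGamesInList_alt gamesList
instance (gamesList : List (List (String × String))) (out : List (String × List (List (String × String)))) : Decidable (Spec_sortGamesInList gamesList out) := by unfold Spec_sortGamesInList; infer_instance

-- ===== CLAIM (what is proved, stated in full; the proofs are below) =====
def Claim_equal_sortGamesInList : Prop := ∀ (gamesList : List (List (String × String))), Dom_sortGamesInList gamesList → Pre_sortGamesInList gamesList → Spec_sortGamesInList gamesList (sortGamesInList gamesList)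

-- ===== LEMMAS AND PROOFS =====

-- one status lookup, shared by both ports
def pvStatus? (game : List (String × String)) : Option String := (PySem.Dict.mk game).get? "status"

lemma pv_fold_filter (l : List (List (String × String)))
    (hl : ∀ g ∈ l, pvStatus? g ≠ none) :
    ∀ a b c, l.foldl
      (fun (acc : List (List (String × String)) × List (List (String × String)) × List (List (String × String))) game =>
        match (PySem.Dict.mk game).get? "status" with
        | some s =>
          if s = "new" then (acc.1 ++ [game], acc.2.1, acc.2.2)
          else if s = "different price" then (acc.1, acc.2.1 ++ [game], acc.2.2)
          else if s = "deleted" then (acc.1, acc.2.1, acc.2.2 ++ [game])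
          else acc
        | none => acc) (a, b, c)
      = (a ++ l.filter (fun g => (PySem.Dict.mk g).get? "status" == some "new"),
         b ++ l.filter (fun g => (PySem.Dict.mk g).get? "status" == some "different price"),
         c ++ l.filter (fun g => (PySem.Dict.mk g).get? "status" == some "deleted")) := by
  induction l with
  | nil => intro a b c; simp
  | cons g t ih =>
    intro a b c
    have hg : pvStatus? g ≠ none := hl g (List.mem_cons_self ..)
    have ht : ∀ x ∈ t, pvStatus? x ≠ none := fun x hx => hl x (List.mem_cons_of_mem _ hx)
    cases hs : (PySem.Dict.mk g).get? "status" with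
    | none => exact absurd hs hg
    | some s =>
      simp only [List.foldl_cons, List.filter_cons, hs]
      by_cases h1 : s = "new"
      · subst h1
        simp only [ih ht]
        simp
      · by_cases h2 : s = "different price"
        · subst h2
          simp only [if_neg h1, ih ht]
          simp
        · by_cases h3 : s = "deleted"
          · subst h3
            simp only [if_neg h1, if_neg h2, ih ht]
            simp
          · simp only [if_neg h1, if_neg h2, if_neg h3, ih ht]
            simp [h1, h2, h3]

-- ===== VERDICT (by name: the statement is the Claim_ definition above) =====
lemma pv_get?_of_mem (g : List (String × String)) (p : String × String)
    (hp : p ∈ g) (hk : p.1 = "status") : (PySem.Dict.mk g).get? "status" ≠ none := by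
  induction g with
  | nil => simp at hp
  | cons q t ih =>
    obtain ⟨k, v⟩ := q
    by_cases hq : k = "status"
    · simp [PySem.Dict.get?_mk_cons, hq]
    · rcases List.mem_cons.mp hp with h | h
      · subst h; exact absurd hk hq
      · simpa [PySem.Dict.get?_mk_cons, hq] using ih h

-- ===== VERDICT (by name: the statement is the Claim_ definition above) =====
theorem sortGamesInList_spec : Claim_equal_sortGamesInList := by
  intro l _ hpre
  have hl : ∀ g ∈ l, pvStatus? g ≠ none := by
    intro g hg
    unfold Pre_sortGamesInList at hpre
    rw [List.all_eq_true] at hpre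
    obtain ⟨p, hp, hk⟩ := List.any_eq_true.mp (hpre g hg)
    exact pv_get?_of_mem g p hp (beq_iff_eq.mp hk)
  show Spec_sortGamesInList l (sortGamesInList l)
  unfold Spec_sortGamesInList sortGamesInList sortGamesInList_alt
  rw [pv_fold_filter l hl]
  simp
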